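-- pv_equiv track=rewrite | github.com/zwukong/ComfyUI-MotionCapture | nodes/smpl_to_bvh_node.py | _get_bvh_joint_order
-- ===== SOURCE A (Python) =====
-- def _get_bvh_joint_order(parent_indices: list) -> list:
--     """
--     Get the depth-first traversal order of joints for BVH motion data.
--     BVH requires motion data to be in the same order as joints appear in hierarchy.
--
--     Args:
--         parent_indices: list of parent indices for each joint
--
--     Returns:
--         list of joint indices in depth-first order
--     """
--     joint_order = []
--
--     def traverse(joint_idx):
--         joint_order.append(joint_idx)
--         # Find children of this joint
--         children = [i for i, parent in enumerate(parent_indices) if parent == joint_idx]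
--         for child_idx in children:
--             traverse(child_idx)
--
--     # Start from root (joint 0)
--     traverse(0)
--     return joint_order
-- ===== SOURCE B (Python) =====
-- def _get_bvh_joint_order(parent_indices: list) -> list:
--     # Different strategy: gather each joint's children in DESCENDING index order
--     # (one reverse pass over the list), walk the tree in POSTORDER (a joint is
--     # emitted only after all of its subtrees), and reverse the postorder at the
--     # end.  Reversing a postorder taken with children in descending order yields
--     # exactly the preorder with children in ascending order, i.e. A's output,
--     # built back-to-front without any per-joint rescans.
--     children = {}
--     for i in range(len(parent_indices) - 1, -1, -1):
--         children.setdefault(parent_indices[i], []).append(i)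
--
--     rev_order = []
--
--     def post(joint_idx):
--         for child_idx in children.get(joint_idx, []):
--             post(child_idx)
--         rev_order.append(joint_idx)
--
--     post(0)
--     rev_order.reverse()
--     return rev_order
-- ===== Notes on version B (the rewrite author's own statement) =====
-- stated objective: alternative
-- what changed: B builds parent-to-children buckets in one reverse pass and walks the tree in POSTORDER with children in descending index order, then reverses the emitted list: the output is produced back-to-front and each joint is emitted after its subtrees, instead of A's preorder DFS that rescans the whole parent list at every visited joint.
import Mathlib
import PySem

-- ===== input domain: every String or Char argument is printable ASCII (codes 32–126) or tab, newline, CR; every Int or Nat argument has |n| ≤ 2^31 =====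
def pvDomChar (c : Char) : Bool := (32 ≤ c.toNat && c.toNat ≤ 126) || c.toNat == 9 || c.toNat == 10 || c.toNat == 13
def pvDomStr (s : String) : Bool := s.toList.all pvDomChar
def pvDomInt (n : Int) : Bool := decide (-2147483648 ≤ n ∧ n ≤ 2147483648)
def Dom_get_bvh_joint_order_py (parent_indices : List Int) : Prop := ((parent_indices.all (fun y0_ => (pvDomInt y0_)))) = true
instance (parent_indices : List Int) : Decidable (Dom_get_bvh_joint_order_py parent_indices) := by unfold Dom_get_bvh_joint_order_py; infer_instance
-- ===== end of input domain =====

-- B replaces A's preorder DFS (per-joint rescan of the whole list) by one reverse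
-- bucketing pass plus a postorder walk with descending children whose reversal is
-- A's order (alternative decomposition; same return value, no speed claim).

-- ===== PORT A =====
-- A: recursive preorder DFS from joint 0; at each joint it scans the whole
-- parent list (enumerate + filter) to find its children, in ascending order.
-- Fuel (length+1) only makes the recursion total in Lean; under Pre_ it is
-- never exhausted.
def pvTravA (parents : List Int) : Nat → Int → List Int → List Int
  | 0, _, acc => acc
  | fuel+1, j, acc =>
    ((PySem.List.enumerate parents).filter (fun p => p.2 == j)).foldl
      (fun a p => pvTravA parents fuel p.1 a) (acc ++ [j])

def get_bvh_joint_order_py (parent_indices : List Int) : List Int :=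
  pvTravA parent_indices (parent_indices.length + 1) 0 []

-- ===== PORT B =====
-- B: one pass over the list in DESCENDING index order (range(n-1,-1,-1),
-- ported as a foldl over the reversed enumerate — exact) builds the
-- parent → children buckets, each bucket in descending order.
def pvChildMapB (parents : List Int) : PySem.Dict Int (List Int) :=
  (PySem.List.enumerate parents).reverse.foldl
    (fun d p => d.modify p.2 [] (fun l => l ++ [p.1])) PySem.Dict.empty

-- postorder walk: emit a joint only after all of its subtrees (fuel as in A)
def pvPost (cmap : PySem.Dict Int (List Int)) : Nat → Int → List Int → List Int
  | 0, _, acc => acc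
  | fuel+1, j, acc =>
    ((cmap.getD j []).foldl (fun a c => pvPost cmap fuel c a) acc) ++ [j]

def get_bvh_joint_order_py_alt (parent_indices : List Int) : List Int :=
  (pvPost (pvChildMapB parent_indices) (parent_indices.length + 1) 0 []).reverse

-- ===== PRECONDITION & SPEC =====
-- parent of joint j, when j is a valid nonnegative index
def pvParentOf (parents : List Int) (j : Int) : Option Int :=
  if j < 0 then none else parents[j.toNat]?

-- does the parent chain starting at j reach joint 0 within k steps?
def pvChainHits0 (parents : List Int) : Nat → Int → Bool
  | 0, _ => false
  | k+1, j =>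
    match pvParentOf parents j with
    | none => false
    | some p => p == 0 || pvChainHits0 parents k p

-- Pre_ excludes exactly the inputs on which joint 0 lies on a parent cycle
-- (e.g. parent_indices[0] == 0): there Python A recurses forever (RecursionError).
def Pre_get_bvh_joint_order_py (parent_indices : List Int) : Prop :=
  pvChainHits0 parent_indices parent_indices.length 0 = false

instance (parent_indices : List Int) : Decidable (Pre_get_bvh_joint_order_py parent_indices) := by
  unfold Pre_get_bvh_joint_order_py; infer_instance

def pvWitness_get_bvh_joint_order_py : List Int := [-1, 0, 0, 1, 3, 1]

def Spec_get_bvh_joint_order_py (parent_indices : List Int) (out : List Int) : Prop := out = get_bvh_joint_order_py_alt parent_indices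
instance (parent_indices : List Int) (out : List Int) : Decidable (Spec_get_bvh_joint_order_py parent_indices out) := by unfold Spec_get_bvh_joint_order_py; infer_instance

-- ===== CLAIM (what is proved, stated in full; the proofs are below) =====
def Claim_equal_get_bvh_joint_order_py : Prop := ∀ (parent_indices : List Int), Dom_get_bvh_joint_order_py parent_indices → Pre_get_bvh_joint_order_py parent_indices → Spec_get_bvh_joint_order_py parent_indices (get_bvh_joint_order_py parent_indices)

-- ===== LEMMAS AND PROOFS =====

-- The bucket foldl's entry at j collects exactly the first components of the
-- pairs of the iterated list whose second component is j.
theorem pvBuckets_getD (l : List (Int × Int)) (d : PySem.Dict Int (List Int)) (j : Int) :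
    (l.foldl (fun d p => d.modify p.2 [] (fun c => c ++ [p.1])) d).getD j []
      = d.getD j [] ++ (l.filter (fun p => p.2 == j)).map (·.1) := by
  induction l generalizing d with
  | nil => simp
  | cons p l ih =>
    simp only [List.foldl_cons, List.filter_cons]
    by_cases h : p.2 = j
    · subst h
      simp [ih, PySem.Dict.getD_modify_self]
    · rw [ih]
      have hb : (p.2 == j) = false := by simp [h]
      rw [PySem.Dict.getD_modify_of_ne _ _ _ (fun he => h he.symm), hb]
      simp

-- B's bucket at j is A's (ascending) children list of j, reversed.
theorem pvChildMapB_getD (parents : List Int) (j : Int) :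
    (pvChildMapB parents).getD j []
      = (((PySem.List.enumerate parents).filter (fun p => p.2 == j)).map (·.1)).reverse := by
  unfold pvChildMapB
  rw [pvBuckets_getD, PySem.Dict.getD_empty, List.nil_append]
  simp [List.filter_reverse, List.map_reverse]

-- the accumulator of pvPost is a pure prefix
theorem pvPost_append (cmap : PySem.Dict Int (List Int)) :
    ∀ (f : Nat) (j : Int) (acc : List Int),
      pvPost cmap f j acc = acc ++ pvPost cmap f j [] := by
  intro f
  induction f with
  | zero => intro j acc; simp [pvPost]
  | succ f ih =>
    have h : ∀ (l : List Int) (a : List Int),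
        l.foldl (fun x c => pvPost cmap f c x) a
          = a ++ l.foldl (fun x c => pvPost cmap f c x) [] := by
      intro l
      induction l with
      | nil => simp
      | cons c l ihl =>
        intro a
        simp only [List.foldl_cons]
        rw [ih c a, ihl, ihl (pvPost cmap f c []), List.append_assoc]
    intro j acc
    show (cmap.getD j []).foldl (fun x c => pvPost cmap f c x) acc ++ [j]
        = acc ++ ((cmap.getD j []).foldl (fun x c => pvPost cmap f c x) [] ++ [j])
    rw [h, List.append_assoc]

-- a postorder foldl is the concatenation of the individual postorders
theorem pvPost_foldl_flatten (cmap : PySem.Dict Int (List Int)) (f : Nat) :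
    ∀ (l : List Int) (a : List Int),
      l.foldl (fun x c => pvPost cmap f c x) a
        = a ++ (l.map (fun c => pvPost cmap f c [])).flatten := by
  intro l
  induction l with
  | nil => simp
  | cons c l ihl =>
    intro a
    simp only [List.foldl_cons, List.map_cons, List.flatten_cons]
    rw [pvPost_append cmap f c a, ihl, List.append_assoc]

-- MAIN: A's preorder from j equals the reverse of B's postorder from j,
-- at every fuel (both ports truncate identically level by level).
theorem pvTrav_eq_revPost (parents : List Int) :
    ∀ (f : Nat) (j : Int) (acc : List Int),
      pvTravA parents f j acc
        = acc ++ (pvPost (pvChildMapB parents) f j []).reverse := by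
  intro f
  induction f with
  | zero => intro j acc; simp [pvTravA, pvPost]
  | succ f ih =>
    intro j acc
    -- A side: fold over the ascending children pairs
    have hA : ∀ (ps : List (Int × Int)) (a : List Int),
        ps.foldl (fun x p => pvTravA parents f p.1 x) a
          = a ++ (ps.map (fun p => (pvPost (pvChildMapB parents) f p.1 []).reverse)).flatten := by
      intro ps
      induction ps with
      | nil => simp
      | cons p ps ihc =>
        intro a
        simp only [List.foldl_cons, List.map_cons, List.flatten_cons]
        rw [ih p.1 a, ihc, List.append_assoc]
    show ((PySem.List.enumerate parents).filter (fun p => p.2 == j)).foldl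
          (fun a p => pvTravA parents f p.1 a) (acc ++ [j])
        = acc ++ (pvPost (pvChildMapB parents) (f+1) j []).reverse
    rw [hA]
    show acc ++ [j] ++ _
        = acc ++ (((pvChildMapB parents).getD j []).foldl
            (fun x c => pvPost (pvChildMapB parents) f c x) [] ++ [j]).reverse
    rw [pvPost_foldl_flatten, List.nil_append, pvChildMapB_getD,
        List.reverse_append, List.reverse_cons, List.reverse_nil, List.nil_append,
        List.reverse_flatten]
    simp only [List.map_map, List.map_reverse, List.reverse_reverse, List.append_assoc,
      List.append_cancel_left_eq]
    rfl

-- ===== VERDICT (by name: the statement is the Claim_ definition above) =====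
theorem get_bvh_joint_order_py_spec : Claim_equal_get_bvh_joint_order_py := by
  intro parents _ _
  unfold Spec_get_bvh_joint_order_py get_bvh_joint_order_py get_bvh_joint_order_py_alt
  rw [pvTrav_eq_revPost parents (parents.length + 1) 0 [], List.nil_append]
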